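-- pv_equiv track=rewrite | github.com/treble-maker123/flare | src/datagen_aibl.py | get_which_visits
-- ===== SOURCE A (Python) =====
-- def get_which_visits(visits):
--     """
--     JW: Returns list of visits in integer form where bl -> 0, m06 ->1, ...
--     """
--     which_visits = []
--     dict_visit2int = {'bl':0,
--           'm18':1,
--           'm36':2,
--           'm54':3,
--           'none':-1}
--     for key in visits:
--         which_visits.append(dict_visit2int[key])
--
--     which_visits = [x for x in which_visits if x != -1]
--     return sorted(which_visits)
-- ===== SOURCE B (Python) =====
-- def get_which_visits(visits):
--     """
--     JW: Returns list of visits in integer form where bl -> 0, m06 ->1, ...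
--     Counting-sort version: one pass counting occurrences, then emit 0..3.
--     """
--     dict_visit2int = {'bl': 0,
--           'm18': 1,
--           'm36': 2,
--           'm54': 3,
--           'none': -1}
--     counts = [0, 0, 0, 0]
--     for key in visits:
--         v = dict_visit2int[key]
--         if v != -1:
--             counts[v] += 1
--     out = []
--     for v in range(4):
--         out.extend([v] * counts[v])
--     return out
-- ===== Notes on version B (the rewrite author's own statement) =====
-- stated objective: alternative
-- what changed: Replaced map-then-filter-then-comparison-sort with a single counting pass over the visits (a 4-slot counts array) followed by emitting each value 0..3 counts[v] times, i.e. a counting sort instead of a comparison sort.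
import Mathlib
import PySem

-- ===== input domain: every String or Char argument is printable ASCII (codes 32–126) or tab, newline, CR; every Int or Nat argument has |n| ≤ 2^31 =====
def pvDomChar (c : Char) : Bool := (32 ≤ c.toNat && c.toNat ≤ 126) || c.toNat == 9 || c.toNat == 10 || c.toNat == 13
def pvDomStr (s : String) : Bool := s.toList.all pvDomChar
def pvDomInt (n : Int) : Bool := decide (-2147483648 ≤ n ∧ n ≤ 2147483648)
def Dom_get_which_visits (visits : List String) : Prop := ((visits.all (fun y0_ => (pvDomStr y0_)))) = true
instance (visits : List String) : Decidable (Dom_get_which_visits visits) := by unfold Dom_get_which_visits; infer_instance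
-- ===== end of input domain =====

-- ===== PORT A =====
-- B replaces the comparison sort of the filtered visit codes by a counting sort (alternative algorithm).
def get_which_visits (visits : List String) : List Int :=
  let which_visits : List Int := []
  let dict_visit2int : PySem.Dict String Int :=
    PySem.Dict.ofList [("bl", 0), ("m18", 1), ("m36", 2), ("m54", 3), ("none", -1)]
  -- dict_visit2int[key]: get? = none is Python's KeyError, excluded by Pre_; .getD 0 never fires there
  let which_visits := visits.foldl
    (fun acc key => acc ++ [(PySem.Dict.get? dict_visit2int key).getD 0]) which_visits
  let which_visits := which_visits.filter (fun x => x != -1)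
  PySem.List.sorted which_visits (fun x => x) false

-- ===== PORT B =====
def get_which_visits_alt (visits : List String) : List Int :=
  let dict_visit2int : PySem.Dict String Int :=
    PySem.Dict.ofList [("bl", 0), ("m18", 1), ("m36", 2), ("m54", 3), ("none", -1)]
  -- dict_visit2int[key]: get? = none is Python's KeyError, excluded by Pre_; .getD 0 never fires there
  let counts := visits.foldl
    (fun (c : Nat × Nat × Nat × Nat) key =>
      let v := (PySem.Dict.get? dict_visit2int key).getD 0
      if v = -1 then c
      else if v = 0 then (c.1 + 1, c.2.1, c.2.2.1, c.2.2.2)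
      else if v = 1 then (c.1, c.2.1 + 1, c.2.2.1, c.2.2.2)
      else if v = 2 then (c.1, c.2.1, c.2.2.1 + 1, c.2.2.2)
      else (c.1, c.2.1, c.2.2.1, c.2.2.2 + 1))
    (0, 0, 0, 0)
  List.replicate counts.1 (0 : Int) ++ List.replicate counts.2.1 1 ++
    List.replicate counts.2.2.1 2 ++ List.replicate counts.2.2.2 3

-- ===== PRECONDITION & SPEC =====
-- Pre_ excludes exactly the inputs on which A raises KeyError: a visit string outside the dict's keys.
def Pre_get_which_visits (visits : List String) : Prop :=
  ∀ v ∈ visits, v = "bl" ∨ v = "m18" ∨ v = "m36" ∨ v = "m54" ∨ v = "none"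
instance (visits : List String) : Decidable (Pre_get_which_visits visits) := by
  unfold Pre_get_which_visits; infer_instance
def pvWitness_get_which_visits : List String := ["m54", "bl", "none", "m18", "bl"]

def Spec_get_which_visits (visits : List String) (out : List Int) : Prop := out = get_which_visits_alt visits
instance (visits : List String) (out : List Int) : Decidable (Spec_get_which_visits visits out) := by unfold Spec_get_which_visits; infer_instance

-- ===== CLAIM (what is proved, stated in full; the proofs are below) =====
def Claim_equal_get_which_visits : Prop := ∀ (visits : List String), Dom_get_which_visits visits → Pre_get_which_visits visits → Spec_get_which_visits visits (get_which_visits visits)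

-- ===== LEMMAS AND PROOFS =====

-- the (totalized) lookup both ports perform
def pvF (k : String) : Int :=
  (PySem.Dict.get? (PySem.Dict.ofList [("bl", 0), ("m18", 1), ("m36", 2), ("m54", 3), ("none", -1)]) k).getD 0

lemma pvF_mem (k : String) : pvF k = -1 ∨ pvF k = 0 ∨ pvF k = 1 ∨ pvF k = 2 ∨ pvF k = 3 := by
  have hd : PySem.Dict.ofList [("bl", (0:Int)), ("m18", 1), ("m36", 2), ("m54", 3), ("none", -1)]
      = PySem.Dict.mk [("bl", 0), ("m18", 1), ("m36", 2), ("m54", 3), ("none", -1)] := by decide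
  simp only [pvF, hd, PySem.Dict.get?_mk_cons]
  split_ifs <;> simp [PySem.Dict.get?]

-- the filtered mapped list both algorithms are about
def pvL (visits : List String) : List Int :=
  (visits.map pvF).filter (fun x => x != -1)

lemma pvL_mem (visits : List String) :
    ∀ x ∈ pvL visits, x = 0 ∨ x = 1 ∨ x = 2 ∨ x = 3 := by
  intro x hx
  simp only [pvL, List.mem_filter, List.mem_map] at hx
  obtain ⟨⟨k, _, rfl⟩, hne⟩ := hx
  rcases pvF_mem k with h | h | h | h | h <;> simp_all

lemma a_eq_sorted (visits : List String) :
    get_which_visits visits = PySem.List.sorted (pvL visits) (fun x => x) false := by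
  simp only [get_which_visits, pvL]
  rw [PySem.List.foldl_append_singleton_eq_map]
  rfl

-- the counting loop of B, as a named function of the start accumulator (defeq to B's foldl)
def pvCountsFrom (c : Nat × Nat × Nat × Nat) (visits : List String) : Nat × Nat × Nat × Nat :=
  visits.foldl
    (fun (c : Nat × Nat × Nat × Nat) key =>
      if pvF key = -1 then c
      else if pvF key = 0 then (c.1 + 1, c.2.1, c.2.2.1, c.2.2.2)
      else if pvF key = 1 then (c.1, c.2.1 + 1, c.2.2.1, c.2.2.2)
      else if pvF key = 2 then (c.1, c.2.1, c.2.2.1 + 1, c.2.2.2)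
      else (c.1, c.2.1, c.2.2.1, c.2.2.2 + 1)) c

lemma counts_invariant (visits : List String) (c : Nat × Nat × Nat × Nat) :
    pvCountsFrom c visits
    = (c.1 + (pvL visits).count 0, c.2.1 + (pvL visits).count 1,
       c.2.2.1 + (pvL visits).count 2, c.2.2.2 + (pvL visits).count 3) := by
  induction visits generalizing c with
  | nil => simp [pvCountsFrom, pvL]
  | cons k t ih =>
      simp only [pvCountsFrom, List.foldl_cons, pvL, List.map_cons, List.filter_cons] at ih ⊢
      rcases pvF_mem k with h | h | h | h | h <;>
        simp [h, ih, Nat.add_assoc, Nat.add_comm 1]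

lemma b_eq_counts (visits : List String) :
    get_which_visits_alt visits =
      List.replicate ((pvL visits).count 0) (0 : Int) ++
      List.replicate ((pvL visits).count 1) 1 ++
      List.replicate ((pvL visits).count 2) 2 ++
      List.replicate ((pvL visits).count 3) 3 := by
  show List.replicate (pvCountsFrom (0, 0, 0, 0) visits).1 (0 : Int) ++
      List.replicate (pvCountsFrom (0, 0, 0, 0) visits).2.1 1 ++
      List.replicate (pvCountsFrom (0, 0, 0, 0) visits).2.2.1 2 ++
      List.replicate (pvCountsFrom (0, 0, 0, 0) visits).2.2.2 3 = _
  rw [counts_invariant]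
  simp

lemma b_perm (visits : List String) :
    (get_which_visits_alt visits).Perm (pvL visits) := by
  rw [b_eq_counts, List.perm_iff_count]
  intro x
  rcases eq_or_ne x 0 with rfl | h0
  · simp [List.count_append, List.count_replicate]
  rcases eq_or_ne x 1 with rfl | h1
  · simp [List.count_append, List.count_replicate]
  rcases eq_or_ne x 2 with rfl | h2
  · simp [List.count_append, List.count_replicate]
  rcases eq_or_ne x 3 with rfl | h3
  · simp [List.count_append, List.count_replicate]
  have hx : x ∉ pvL visits := fun hmem => by
    rcases pvL_mem visits x hmem with h | h | h | h <;> simp_all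
  simp only [List.count_append, List.count_replicate, List.count_eq_zero_of_not_mem hx,
    beq_iff_eq]
  split_ifs <;> omega

lemma b_pairwise (visits : List String) :
    (get_which_visits_alt visits).Pairwise (fun a b => a ≤ b) := by
  rw [b_eq_counts]
  have hrep : ∀ (n : Nat) (v : Int), (List.replicate n v).Pairwise (fun a b : Int => a ≤ b) :=
    fun n v => List.pairwise_replicate.mpr (Or.inr le_rfl)
  refine List.pairwise_append.mpr ⟨List.pairwise_append.mpr
    ⟨List.pairwise_append.mpr ⟨hrep _ _, hrep _ _, ?_⟩, hrep _ _, ?_⟩, hrep _ _, ?_⟩ <;>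
  · intro a ha b hb
    simp only [List.mem_append, List.mem_replicate] at ha hb
    omega

-- ===== VERDICT (by name: the statement is the Claim_ definition above) =====
theorem get_which_visits_spec : Claim_equal_get_which_visits := by
  intro visits _ _
  unfold Spec_get_which_visits
  rw [a_eq_sorted]
  apply PySem.List.eq_of_perm_of_pairwise_le_of_injective (key := fun x : Int => x)
    (fun a b h => h)
  · exact ((PySem.List.sorted_perm (pvL visits) (fun x => x) false).trans (b_perm visits).symm)
  · exact PySem.List.sorted_pairwise (pvL visits) (fun x => x)
  · exact b_pairwise visits
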